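-- pv_equiv track=rewrite | github.com/SpaceJ0392/coding_test | coding_masters_v2/8710_NIMBY.py | find_best_location
-- ===== SOURCE A (Python) =====
-- def calculate_satisfaction(house_positions, K, location):
--     satisfaction = 0
--     for house in house_positions:
--         distance = abs(house - location)
--         if distance <= K:
--             satisfaction += distance
--         else:
--             satisfaction -= distance
--     return satisfaction
--
-- def find_best_location(N, K, house_positions):
--     house_positions.sort()
--     max_satisfaction = float('-inf')
--     best_location = None
--
--     for location in house_positions:
--         current_satisfaction = calculate_satisfaction(house_positions, K, location)
--         if current_satisfaction > max_satisfaction: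
--             max_satisfaction = current_satisfaction
--             best_location = location
--         elif current_satisfaction == max_satisfaction:
--             best_location = min(best_location, location)
--
--     return best_location
-- ===== SOURCE B (Python) =====
-- # Prefix sums + binary search: satisfaction(x) = 2*inside - total, where inside is the
-- # abs-distance sum over the K-window around x and total the abs-distance sum over all
-- # houses, both read off prefix sums in O(log N) per candidate (O(N log N) overall).
-- # Like A, this sorts house_positions in place.
--
-- def _bisect_left(p, v):
--     # standard library bisect.bisect_left, hand-written because A imports nothing
--     lo, hi = 0, len(p)
--     while lo < hi:
--         mid = (lo + hi) // 2
--         if p[mid] < v: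
--             lo = mid + 1
--         else:
--             hi = mid
--     return lo
--
-- def _bisect_right(p, v):
--     # standard library bisect.bisect_right, hand-written because A imports nothing
--     lo, hi = 0, len(p)
--     while lo < hi:
--         mid = (lo + hi) // 2
--         if v < p[mid]:
--             hi = mid
--         else:
--             lo = mid + 1
--     return lo
--
-- def _satisfaction(p, pref, n, K, x):
--     lo = _bisect_left(p, x - K)
--     hi = _bisect_right(p, x + K)
--     m = _bisect_left(p, x)
--     total = (x * m - pref[m]) + (pref[n] - pref[m]) - x * (n - m)
--     if lo < hi:
--         inside = (x * (m - lo) - (pref[m] - pref[lo])) + (pref[hi] - pref[m]) - x * (hi - m)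
--     else:
--         inside = 0
--     return 2 * inside - total
--
-- def find_best_location(N, K, house_positions):
--     house_positions.sort()
--     p = house_positions
--     n = len(p)
--     pref = [0]
--     acc = 0
--     for h in p:
--         acc += h
--         pref.append(acc)
--     best_sat = None
--     best = None
--     for x in p:
--         s = _satisfaction(p, pref, n, K, x)
--         if best_sat is None or s > best_sat:
--             best_sat = s
--             best = x
--     return best
-- ===== Notes on version B (the rewrite author's own statement) =====
-- stated objective: faster
-- what changed: A recomputes the satisfaction with a full O(N) scan of all houses for every candidate; B sorts once, builds a prefix-sum array and, per candidate, gets the satisfaction as 2*window_sum - total_sum from prefix sums plus binary searches for the K-window bounds, keeping the first (= smallest) maximizer with a strict comparison.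
-- outside the precondition, e.g. on find_best_location(0, 0, []): A returns None, B returns None
import Mathlib
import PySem

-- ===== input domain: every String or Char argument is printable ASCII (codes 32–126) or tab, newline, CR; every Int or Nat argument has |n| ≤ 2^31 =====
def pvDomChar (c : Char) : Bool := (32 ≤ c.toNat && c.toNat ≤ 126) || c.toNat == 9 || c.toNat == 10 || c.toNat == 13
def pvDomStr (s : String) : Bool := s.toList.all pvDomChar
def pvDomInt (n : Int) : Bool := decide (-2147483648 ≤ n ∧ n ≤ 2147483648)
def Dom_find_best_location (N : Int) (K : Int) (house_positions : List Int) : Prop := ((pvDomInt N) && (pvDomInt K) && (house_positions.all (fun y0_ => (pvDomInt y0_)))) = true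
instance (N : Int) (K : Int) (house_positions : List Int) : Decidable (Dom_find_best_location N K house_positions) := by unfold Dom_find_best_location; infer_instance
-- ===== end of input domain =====

-- B replaces A's quadratic rescan per candidate by prefix sums + binary search
-- (satisfaction = 2*window-sum - total-sum); like A it sorts house_positions in
-- place, and the equivalence proved is about the return value.


-- ===== PORT A =====
def calculate_satisfaction (house_positions : List Int) (K : Int) (location : Int) : Int :=
  house_positions.foldl (fun satisfaction house =>
    let distance := |house - location|
    if distance ≤ K then satisfaction + distance else satisfaction - distance) 0

def find_best_location (N : Int) (K : Int) (house_positions : List Int) : Int :=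
  let sortedp := PySem.List.sorted house_positions (fun x => x) false
  let res := sortedp.foldl (fun (st : Option Int × Option Int) location =>
      let current := calculate_satisfaction sortedp K location
      match st.1 with
      | none => (some current, some location)          -- current > -inf always
      | some ms =>
        if current > ms then (some current, some location)
        else if current = ms then (some ms, some (min (st.2.getD 0) location))
        else st)
    ((none : Option Int), (none : Option Int))
  res.2.getD 0   -- Python returns None exactly for the empty list, excluded by Pre_

-- ===== PORT B =====
-- _bisect_left / _bisect_right in Source B are verbatim the standard library's
-- bisect.bisect_left / bisect_right, ported as the prelude's primitives.
-- pref[i] (indices always 0 ≤ i ≤ len(p)) is ported as List.getD.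
def satisfactionAlt (p pref : List Int) (n : Nat) (K : Int) (x : Int) : Int :=
  let lo := PySem.List.bisectLeft p (x - K)
  let hi := PySem.List.bisectRight p (x + K)
  let m := PySem.List.bisectLeft p x
  let total := (x * (m : Int) - pref.getD m 0) + (pref.getD n 0 - pref.getD m 0) - x * ((n : Int) - (m : Int))
  let inside := if lo < hi then
      (x * ((m : Int) - (lo : Int)) - (pref.getD m 0 - pref.getD lo 0)) + (pref.getD hi 0 - pref.getD m 0) - x * ((hi : Int) - (m : Int))
    else 0
  2 * inside - total

def find_best_location_alt (N : Int) (K : Int) (house_positions : List Int) : Int :=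
  let p := PySem.List.sorted house_positions (fun x => x) false
  let n := p.length
  let pref := List.scanl (· + ·) 0 p
  let res := p.foldl (fun (st : Option Int × Option Int) x =>
      let s := satisfactionAlt p pref n K x
      match st.1 with
      | none => (some s, some x)                       -- best_sat is None
      | some bs => if s > bs then (some s, some x) else st)
    ((none : Option Int), (none : Option Int))
  res.2.getD 0   -- best is None exactly for the empty list, excluded by Pre_

-- ===== PRECONDITION & SPEC =====
-- Pre_ excludes only the empty list, on which A returns None, which is not an Int.
def Pre_find_best_location (N : Int) (K : Int) (house_positions : List Int) : Prop :=
  house_positions ≠ []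
instance (N : Int) (K : Int) (house_positions : List Int) : Decidable (Pre_find_best_location N K house_positions) := by unfold Pre_find_best_location; infer_instance

def pvWitness_find_best_location : Int × Int × List Int := (3, 2, [5, 1, 9])

def Spec_find_best_location (N : Int) (K : Int) (house_positions : List Int) (out : Int) : Prop := out = find_best_location_alt N K house_positions
instance (N : Int) (K : Int) (house_positions : List Int) (out : Int) : Decidable (Spec_find_best_location N K house_positions out) := by unfold Spec_find_best_location; infer_instance

-- ===== CLAIM (what is proved, stated in full; the proofs are below) =====
def Claim_equal_find_best_location : Prop := ∀ (N : Int) (K : Int) (house_positions : List Int), Dom_find_best_location N K house_positions → Pre_find_best_location N K house_positions → Spec_find_best_location N K house_positions (find_best_location N K house_positions)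

-- ===== LEMMAS AND PROOFS =====

-- the per-house contribution inside A's satisfaction loop
def contrib (K x h : Int) : Int := if |h - x| ≤ K then |h - x| else -|h - x|

-- prefix of the running-sum list = sum of the corresponding take
theorem scanl_add_getD (l : List Int) (a : Int) (i : Nat) (hi : i ≤ l.length) :
    (List.scanl (· + ·) a l).getD i 0 = a + (l.take i).sum := by
  induction l generalizing a i with
  | nil =>
    have h0 : i = 0 := by simpa using hi
    subst h0; simp
  | cons h t ih =>
    cases i with
    | zero => simp
    | succ j =>
      simp only [List.scanl_cons, List.getD_cons_succ, List.take_succ_cons, List.sum_cons]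
      rw [ih (a + h) j (by simpa using hi)]; ring

theorem sum_map_sub_left (l : List Int) (g : Int → Int) (x : Int)
    (h : ∀ y ∈ l, g y = x - y) : (l.map g).sum = x * l.length - l.sum := by
  induction l with
  | nil => simp
  | cons c t ih =>
    simp only [List.map_cons, List.sum_cons, List.length_cons]
    rw [h c (by simp), ih (fun y hy => h y (by simp [hy]))]
    push_cast; ring

theorem sum_map_sub_right (l : List Int) (g : Int → Int) (x : Int)
    (h : ∀ y ∈ l, g y = y - x) : (l.map g).sum = l.sum - x * l.length := by
  induction l with
  | nil => simp
  | cons c t ih =>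
    simp only [List.map_cons, List.sum_cons, List.length_cons]
    rw [h c (by simp), ih (fun y hy => h y (by simp [hy]))]
    push_cast; ring

-- A's satisfaction loop is the sum of contributions
theorem calc_eq_sum (p : List Int) (K x : Int) :
    calculate_satisfaction p K x = (p.map (contrib K x)).sum := by
  unfold calculate_satisfaction
  have h : p.foldl (fun satisfaction house =>
      let distance := |house - x|
      if distance ≤ K then satisfaction + distance else satisfaction - distance) 0
      = p.foldl (fun s h => s + contrib K x h) 0 := by
    apply PySem.List.foldl_congr_mem
    intro acc y _
    simp only [contrib]
    split_ifs <;> ring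
  rw [h, PySem.List.foldl_add (g := contrib K x)]
  simp

-- membership in a middle segment gives an index with its bounds
theorem mem_drop_take (p : List Int) (a b : Nat) (y : Int)
    (hy : y ∈ (p.take b).drop a) :
    ∃ (j : Nat) (hj : j < p.length), a ≤ j ∧ j < b ∧ p[j] = y := by
  obtain ⟨i, hilen, hiy⟩ := List.mem_iff_getElem.mp hy
  have hl : i < min b p.length - a := by simpa using hilen
  have hb : a + i < p.length := by omega
  have hab : a + i < b := by omega
  have h2 : ((p.take b).drop a)[i] = p[a + i]'hb := by
    rw [List.getElem_drop, List.getElem_take]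
  exact ⟨a + i, hb, by omega, hab, by rw [← h2, hiy]⟩

-- the heart of the proof: the prefix-sum/bisect formula computes A's satisfaction sum
theorem sat_eq (p : List Int) (hs : p.Pairwise (· ≤ ·)) (K x : Int) :
    satisfactionAlt p (List.scanl (· + ·) 0 p) p.length K x
      = (p.map (contrib K x)).sum := by
  obtain ⟨hlon, hlo1, hlo2⟩ := PySem.List.bisectLeft_spec p (x - K) hs
  obtain ⟨hhin, hhi1, hhi2⟩ := PySem.List.bisectRight_spec p (x + K) hs
  obtain ⟨hmn, hm1, hm2⟩ := PySem.List.bisectLeft_spec p x hs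
  set n := p.length with hn
  set lo := PySem.List.bisectLeft p (x - K) with hlodef
  set hi := PySem.List.bisectRight p (x + K) with hhidef
  set m := PySem.List.bisectLeft p x with hmdef
  have hpref : ∀ i, i ≤ n → (List.scanl (· + ·) 0 p).getD i 0 = (p.take i).sum := by
    intro i h; rw [scanl_add_getD p 0 i h, zero_add]
  simp only [satisfactionAlt]
  rw [hpref m hmn, hpref hi hhin, hpref lo hlon, hpref n le_rfl, List.take_length]
  rcases le_or_gt 0 K with hK | hK
  · -- K ≥ 0 : four segments take lo ++ [lo,m) ++ [m,hi) ++ drop hi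
    have hlom : lo ≤ m := by
      by_contra hc
      have h : m < lo := by omega
      have hmlt : m < p.length := lt_of_lt_of_le h hlon
      have h1 := hlo1 m hmlt h
      have h2 := hm2 m hmlt le_rfl
      omega
    have hmhi : m ≤ hi := by
      by_contra hc
      have h : hi < m := by omega
      have hhlt : hi < p.length := lt_of_lt_of_le h hmn
      have h1 := hm1 hi hhlt h
      have h2 := hhi2 hi hhlt le_rfl
      omega
    have d1 : p.take m = p.take lo ++ (p.take m).drop lo := by
      conv_lhs => rw [← List.take_append_drop lo (p.take m)]
      rw [List.take_take, Nat.min_eq_left hlom]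
    have d2 : p.take hi = p.take m ++ (p.take hi).drop m := by
      conv_lhs => rw [← List.take_append_drop m (p.take hi)]
      rw [List.take_take, Nat.min_eq_left hmhi]
    have d3 : p = p.take hi ++ p.drop hi := (List.take_append_drop hi p).symm
    have hsplit : p = p.take lo ++ (p.take m).drop lo ++ (p.take hi).drop m ++ p.drop hi := by
      conv_lhs => rw [d3, d2, d1]
    -- element values on each segment
    have e1 : ((p.take lo).map (contrib K x)).sum
        = (p.take lo).sum - x * (p.take lo).length := by
      apply sum_map_sub_right
      intro y hy
      obtain ⟨j, hj, _, hjlt, heq⟩ := mem_drop_take p 0 lo y (by simpa using hy)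
      have hb := hlo1 j hj hjlt
      rw [← heq]
      simp only [contrib]
      rw [abs_of_nonpos (by omega), if_neg (by omega)]
      ring
    have e2 : (((p.take m).drop lo).map (contrib K x)).sum
        = x * ((p.take m).drop lo).length - ((p.take m).drop lo).sum := by
      apply sum_map_sub_left
      intro y hy
      obtain ⟨j, hj, hjge, hjlt, heq⟩ := mem_drop_take p lo m y hy
      have hb1 := hlo2 j hj hjge
      have hb2 := hm1 j hj hjlt
      rw [← heq]
      simp only [contrib]
      rw [abs_of_nonpos (by omega), if_pos (by omega)]
      ring
    have e3 : (((p.take hi).drop m).map (contrib K x)).sum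
        = ((p.take hi).drop m).sum - x * ((p.take hi).drop m).length := by
      apply sum_map_sub_right
      intro y hy
      obtain ⟨j, hj, hjge, hjlt, heq⟩ := mem_drop_take p m hi y hy
      have hb1 := hm2 j hj hjge
      have hb2 := hhi1 j hj hjlt
      rw [← heq]
      simp only [contrib]
      rw [abs_of_nonneg (by omega), if_pos (by omega)]
    have e4 : ((p.drop hi).map (contrib K x)).sum
        = x * (p.drop hi).length - (p.drop hi).sum := by
      apply sum_map_sub_left
      intro y hy
      obtain ⟨j, hj, hjge, _, heq⟩ := mem_drop_take p hi n y
        (by rw [← List.take_length (l := p)] at hy; exact hy)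
      have hb := hhi2 j hj hjge
      rw [← heq]
      simp only [contrib]
      rw [abs_of_nonneg (by omega), if_neg (by omega)]
      ring
    -- segment lengths and sums
    have l1 : ((p.take lo).length : Int) = lo := by
      simp only [List.length_take]
      omega
    have l2 : (((p.take m).drop lo).length : Int) = (m : Int) - lo := by
      simp only [List.length_drop, List.length_take]
      omega
    have l3 : (((p.take hi).drop m).length : Int) = (hi : Int) - m := by
      simp only [List.length_drop, List.length_take]
      omega
    have l4 : ((p.drop hi).length : Int) = (n : Int) - hi := by
      simp only [List.length_drop]
      omega
    have s2 : ((p.take m).drop lo).sum = (p.take m).sum - (p.take lo).sum := by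
      have := congrArg List.sum d1
      rw [List.sum_append] at this
      omega
    have s3 : ((p.take hi).drop m).sum = (p.take hi).sum - (p.take m).sum := by
      have := congrArg List.sum d2
      rw [List.sum_append] at this
      omega
    have s4 : (p.drop hi).sum = p.sum - (p.take hi).sum := by
      have := congrArg List.sum d3
      rw [List.sum_append] at this
      omega
    have hins : (if lo < hi then
        x * ((m : Int) - (lo : Int)) - ((p.take m).sum - (p.take lo).sum)
          + ((p.take hi).sum - (p.take m).sum) - x * ((hi : Int) - (m : Int))
        else 0)
        = x * ((m : Int) - (lo : Int)) - ((p.take m).sum - (p.take lo).sum)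
          + ((p.take hi).sum - (p.take m).sum) - x * ((hi : Int) - (m : Int)) := by
      split_ifs with h
      · rfl
      · have e1' : m = lo := by omega
        have e2' : hi = lo := by omega
        rw [e1', e2']
        ring
    rw [hins]
    conv_rhs => rw [hsplit]
    simp only [List.map_append, List.sum_append]
    rw [e1, e2, e3, e4, s2, s3, s4, l1, l2, l3, l4]
    ring
  · -- K < 0 : the window is empty; every house is "far"
    have hhilo : hi ≤ lo := by
      by_contra hc
      have h : lo < hi := by omega
      have hlolt : lo < p.length := lt_of_lt_of_le h hhin
      have h1 := hlo2 lo hlolt le_rfl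
      have h2 := hhi1 lo hlolt h
      omega
    rw [if_neg (by omega)]
    have dm : p = p.take m ++ p.drop m := (List.take_append_drop m p).symm
    have e1 : ((p.take m).map (contrib K x)).sum
        = (p.take m).sum - x * (p.take m).length := by
      apply sum_map_sub_right
      intro y hy
      obtain ⟨j, hj, _, hjlt, heq⟩ := mem_drop_take p 0 m y (by simpa using hy)
      have hb := hm1 j hj hjlt
      rw [← heq]
      simp only [contrib]
      rw [abs_of_nonpos (by omega), if_neg (by omega)]
      ring
    have e2 : ((p.drop m).map (contrib K x)).sum
        = x * (p.drop m).length - (p.drop m).sum := by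
      apply sum_map_sub_left
      intro y hy
      obtain ⟨j, hj, hjge, _, heq⟩ := mem_drop_take p m n y
        (by rw [← List.take_length (l := p)] at hy; exact hy)
      have hb := hm2 j hj hjge
      rw [← heq]
      simp only [contrib]
      rw [abs_of_nonneg (by omega), if_neg (by omega)]
      ring
    have l1 : ((p.take m).length : Int) = m := by
      simp only [List.length_take]
      omega
    have l2 : ((p.drop m).length : Int) = (n : Int) - m := by
      simp only [List.length_drop]
      omega
    have s2' : (p.drop m).sum = p.sum - (p.take m).sum := by
      have := congrArg List.sum dm
      rw [List.sum_append] at this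
      omega
    conv_rhs => rw [dm]
    simp only [List.map_append, List.sum_append]
    rw [e1, e2, s2', l1, l2]
    ring

-- selection loops agree on a sorted tail whose elements dominate the current best
theorem sel_aux (f : Int → Int) (t : List Int) (ms b : Int)
    (hp : t.Pairwise (· ≤ ·)) (hb : ∀ y ∈ t, b ≤ y) :
    (t.foldl (fun (st : Option Int × Option Int) location =>
      match st.1 with
      | none => (some (f location), some location)
      | some m =>
        if f location > m then (some (f location), some location)
        else if f location = m then (some m, some (min (st.2.getD 0) location))
        else st) (some ms, some b))
    = (t.foldl (fun (st : Option Int × Option Int) x =>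
      match st.1 with
      | none => (some (f x), some x)
      | some bs => if f x > bs then (some (f x), some x) else st) (some ms, some b)) := by
  induction t generalizing ms b with
  | nil => rfl
  | cons c t ih =>
    have hpt := (List.pairwise_cons.mp hp).2
    have hct := (List.pairwise_cons.mp hp).1
    simp only [List.foldl_cons]
    by_cases h1 : f c > ms
    · simp only [h1, if_pos]; exact ih (f c) c hpt hct
    · by_cases h2 : f c = ms
      · have hmin : min b c = b := min_eq_left (hb c (by simp))
        simp only [if_neg h1, if_pos h2]
        simpa [hmin, h2] using ih ms b hpt (fun y hy => hb y (by simp [hy]))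
      · simp only [if_neg h1, if_neg h2]
        exact ih ms b hpt (fun y hy => hb y (by simp [hy]))

-- the two selection loops coincide on a sorted candidate list
theorem sel_eq (f : Int → Int) (l : List Int) (hl : l.Pairwise (· ≤ ·)) :
    (l.foldl (fun (st : Option Int × Option Int) location =>
      match st.1 with
      | none => (some (f location), some location)
      | some m =>
        if f location > m then (some (f location), some location)
        else if f location = m then (some m, some (min (st.2.getD 0) location))
        else st) (none, none))
    = (l.foldl (fun (st : Option Int × Option Int) x =>
      match st.1 with
      | none => (some (f x), some x)
      | some bs => if f x > bs then (some (f x), some x) else st) (none, none)) := by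
  cases l with
  | nil => rfl
  | cons c t =>
    simp only [List.foldl_cons]
    exact sel_aux f t (f c) c (List.pairwise_cons.mp hl).2 (List.pairwise_cons.mp hl).1

-- ===== VERDICT (by name: the statement is the Claim_ definition above) =====
theorem find_best_location_spec : Claim_equal_find_best_location := by
  unfold Claim_equal_find_best_location
  intro N K hp _ hpre
  unfold Spec_find_best_location find_best_location find_best_location_alt
  set p := PySem.List.sorted hp (fun x => x) false with hpd
  have hs : p.Pairwise (· ≤ ·) := PySem.List.sorted_pairwise hp (fun x : Int => x)
  have h1 : p.foldl (fun (st : Option Int × Option Int) x =>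
      let s := satisfactionAlt p (List.scanl (· + ·) 0 p) p.length K x
      match st.1 with
      | none => (some s, some x)
      | some bs => if s > bs then (some s, some x) else st) (none, none)
      = p.foldl (fun (st : Option Int × Option Int) x =>
      match st.1 with
      | none => (some (calculate_satisfaction p K x), some x)
      | some bs => if calculate_satisfaction p K x > bs
          then (some (calculate_satisfaction p K x), some x) else st) (none, none) := by
    apply PySem.List.foldl_congr_mem
    intro acc x _
    rw [show satisfactionAlt p (List.scanl (· + ·) 0 p) p.length K x
        = calculate_satisfaction p K x from by
      rw [sat_eq p hs K x]; exact (calc_eq_sum p K x).symm]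
  have h2 := sel_eq (fun location => calculate_satisfaction p K location) p hs
  exact congrArg (fun r : Option Int × Option Int => r.2.getD 0) (h2.trans h1.symm)
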